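-- pv_equiv track=rewrite | github.com/Freddy0806/app | SIMULADOR DE COLAS con 1-u.py | compactar_indices_1based
-- ===== SOURCE A (Python) =====
-- def compactar_indices_1based(indices0):
--     if not indices0:
--         return ""
--     arr = sorted([i+1 for i in indices0])
--     grupos = []
--     ini = arr[0]
--     prev = arr[0]
--     for x in arr[1:]:
--         if x == prev + 1:
--             prev = x
--         else:
--             grupos.append((ini, prev))
--             ini = x
--             prev = x
--     grupos.append((ini, prev))
--     partes = []
--     for a, b in grupos:
--         if a == b:
--             partes.append(f"{a}")
--         else:
--             partes.append(f"{a}-{b}")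
--     return ", ".join(partes)
-- ===== SOURCE B (Python) =====
-- def compactar_indices_1based(indices0):
--     if not indices0:
--         return ""
--     arr = sorted(i + 1 for i in indices0)
--     gaps = [p for p in zip(arr, arr[1:]) if p[1] != p[0] + 1]
--     starts = [arr[0]] + [b for _, b in gaps]
--     ends = [a for a, _ in gaps] + [arr[-1]]
--     return ", ".join(str(a) if a == b else f"{a}-{b}" for a, b in zip(starts, ends))
-- ===== Notes on version B (the rewrite author's own statement) =====
-- stated objective: alternative
-- what changed: Replaces A's ini/prev state machine that mutates a group accumulator with a declarative zip-of-adjacent-pairs computation: run starts and run ends are read off independently from the gap pairs (b != a+1) of zip(arr, arr[1:]) and zipped together.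
import Mathlib
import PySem

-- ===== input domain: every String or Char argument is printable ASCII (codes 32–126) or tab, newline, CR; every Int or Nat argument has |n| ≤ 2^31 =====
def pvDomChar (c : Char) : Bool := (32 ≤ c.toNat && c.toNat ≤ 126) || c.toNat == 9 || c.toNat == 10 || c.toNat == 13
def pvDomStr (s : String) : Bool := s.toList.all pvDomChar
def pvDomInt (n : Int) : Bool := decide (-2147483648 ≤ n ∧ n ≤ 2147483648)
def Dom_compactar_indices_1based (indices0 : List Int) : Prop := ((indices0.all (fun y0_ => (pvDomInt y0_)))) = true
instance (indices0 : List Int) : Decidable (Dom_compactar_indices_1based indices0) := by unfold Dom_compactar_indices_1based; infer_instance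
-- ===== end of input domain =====

-- B replaces A's ini/prev state machine with a declarative zip-of-adjacent-pairs
-- computation of run starts and run ends (alternative decomposition, same cost).


-- shared f-string formatting: str(a) if a == b else f"{a}-{b}" (identical in both Pythons)
def pvFmt (p : Int × Int) : String :=
  if p.1 = p.2 then PySem.Int.toStr p.1
  else PySem.Int.toStr p.1 ++ "-" ++ PySem.Int.toStr p.2

-- ===== PORT A =====
def compactar_indices_1based (indices0 : List Int) : String :=
  if indices0 = [] then ""
  else
    let arr := PySem.List.sorted (indices0.map (fun i => i + 1)) (fun x => x) false
    -- arr[0]: arr is nonempty here (indices0 ≠ []), so headD never uses its default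
    let ini0 := arr.headD 0
    let st := (PySem.List.slice arr (some 1) none).foldl
      (fun (s : List (Int × Int) × Int × Int) x =>
        if x = s.2.2 + 1 then (s.1, s.2.1, x)
        else (s.1 ++ [(s.2.1, s.2.2)], x, x))
      ([], ini0, ini0)
    let grupos := st.1 ++ [(st.2.1, st.2.2)]
    PySem.Str.join ", " (grupos.map pvFmt)

-- ===== PORT B =====
def compactar_indices_1based_alt (indices0 : List Int) : String :=
  if indices0 = [] then ""
  else
    let arr := PySem.List.sorted (indices0.map (fun i => i + 1)) (fun x => x) false
    let gaps := (arr.zip (PySem.List.slice arr (some 1) none)).filter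
      (fun p => p.2 ≠ p.1 + 1)
    -- arr[0]: arr is nonempty here, so headD never uses its default
    let starts := arr.headD 0 :: gaps.map Prod.snd
    let ends := gaps.map Prod.fst ++ [PySem.List.pyGetD arr (-1) 0]
    PySem.Str.join ", " ((starts.zip ends).map pvFmt)

-- ===== PRECONDITION & SPEC =====
def Spec_compactar_indices_1based (indices0 : List Int) (out : String) : Prop := out = compactar_indices_1based_alt indices0
instance (indices0 : List Int) (out : String) : Decidable (Spec_compactar_indices_1based indices0 out) := by unfold Spec_compactar_indices_1based; infer_instance

-- ===== CLAIM (what is proved, stated in full; the proofs are below) =====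
def Claim_equal_compactar_indices_1based : Prop := ∀ (indices0 : List Int), Dom_compactar_indices_1based indices0 → Spec_compactar_indices_1based indices0 (compactar_indices_1based indices0)

-- ===== LEMMAS AND PROOFS =====

-- reference run decomposition both ports are reduced to
def pvRuns (ini prev : Int) : List Int → List (Int × Int)
  | [] => [(ini, prev)]
  | x :: xs => if x = prev + 1 then pvRuns ini x xs else (ini, prev) :: pvRuns x x xs

-- A's foldl state machine computes pvRuns
lemma pvA_fold (xs : List Int) : ∀ (g : List (Int × Int)) (ini prev : Int),
    (let st := xs.foldl
      (fun (s : List (Int × Int) × Int × Int) x =>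
        if x = s.2.2 + 1 then (s.1, s.2.1, x)
        else (s.1 ++ [(s.2.1, s.2.2)], x, x)) (g, ini, prev);
     st.1 ++ [(st.2.1, st.2.2)]) = g ++ pvRuns ini prev xs := by
  induction xs with
  | nil => intro g ini prev; simp [pvRuns]
  | cons x xs ih =>
    intro g ini prev
    simp only [List.foldl_cons, pvRuns]
    by_cases h : x = prev + 1
    · simp only [h]
      exact ih g ini (prev + 1)
    · simp only [if_neg h]
      rw [ih (g ++ [(ini, prev)]) x x]
      simp

-- B's zip of starts and ends computes pvRuns
lemma pvB_zip (xs : List Int) : ∀ (ini prev : Int),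
    (ini :: (((prev :: xs).zip xs).filter (fun p => decide (p.2 ≠ p.1 + 1))).map Prod.snd).zip
      ((((prev :: xs).zip xs).filter (fun p => decide (p.2 ≠ p.1 + 1))).map Prod.fst
        ++ [(prev :: xs).getLast?.getD 0])
    = pvRuns ini prev xs := by
  induction xs with
  | nil => intro ini prev; simp [pvRuns]
  | cons x xs ih =>
    intro ini prev
    rw [List.getLast?_cons_cons]
    simp only [List.zip_cons_cons, pvRuns, List.filter_cons]
    by_cases h : x = prev + 1
    · simp only [h, ne_eq, not_true_eq_false, decide_false, if_neg Bool.false_ne_true]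
      exact ih ini (prev + 1)
    · have hd : decide (x ≠ prev + 1) = true := by simpa using h
      simp only [ne_eq, hd, if_neg h]
      exact congrArg _ (ih x x)

-- ===== VERDICT (by name: the statement is the Claim_ definition above) =====
theorem compactar_indices_1based_spec : Claim_equal_compactar_indices_1based := by
  intro indices0 _
  unfold Spec_compactar_indices_1based compactar_indices_1based compactar_indices_1based_alt
  by_cases h : indices0 = []
  · simp [h]
  · simp only [if_neg h]
    set arr := PySem.List.sorted (indices0.map (fun i => i + 1)) (fun x => x) false with harr
    have hne : arr ≠ [] := by
      rw [harr, ne_eq, PySem.List.sorted_eq_nil_iff]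
      simpa using h
    obtain ⟨a0, rest, hcons⟩ := List.exists_cons_of_ne_nil hne
    rw [hcons]
    rw [PySem.List.slice_from_one]
    have hlastD : PySem.List.pyGetD (a0 :: rest) (-1) 0 = (a0 :: rest).getLast?.getD 0 := by
      rw [PySem.List.pyGetD_neg_one (a0 :: rest) 0 (by simp)]
      rw [List.getLast?_eq_some_getLast (by simp)]
      rfl
    simp only [List.headD_cons, List.tail_cons, hlastD]
    rw [pvA_fold rest [] a0 a0]
    rw [pvB_zip rest a0 a0]
    simp
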